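-- pv_equiv track=rewrite | github.com/isklenar/brainfuck-py | brainx.py | strip_program
-- ===== SOURCE A (Python) =====
-- def strip_program(program):
--     """
--     Z programu odebere vsechny ne-brainfuckovske znaky.
--     :param program: vstupni program
--     :return: ocisteny program
--     """
--     allowed_commands = [">", "<", "+", "-", "[", "]", ",", ".", "!", "#"]
--     ret = ""
--     input = False
--     for x in program:  # arg je tuple s programem a barvou
--         if x == "!":
--             input = True
--             ret += x
--         elif input:
--             ret += x
--         elif x in allowed_commands:
--             ret += x
--
--     return ret
-- ===== SOURCE B (Python) =====
-- def strip_program(program):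
--     allowed = {'>', '<', '+', '-', '[', ']', ',', '.', '!', '#'}
--     idx = program.find('!')
--     if idx == -1:
--         return ''.join(c for c in program if c in allowed)
--     return ''.join(c for c in program[:idx] if c in allowed) + program[idx:]
-- ===== Notes on version B (the rewrite author's own statement) =====
-- stated objective: simpler
-- what changed: B drops A's stateful boolean flag carried through a char-by-char loop: it locates the split point with str.find first and handles the two regions with differently shaped passes (filter the prefix, keep the tail verbatim via a slice).
import Mathlib
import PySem

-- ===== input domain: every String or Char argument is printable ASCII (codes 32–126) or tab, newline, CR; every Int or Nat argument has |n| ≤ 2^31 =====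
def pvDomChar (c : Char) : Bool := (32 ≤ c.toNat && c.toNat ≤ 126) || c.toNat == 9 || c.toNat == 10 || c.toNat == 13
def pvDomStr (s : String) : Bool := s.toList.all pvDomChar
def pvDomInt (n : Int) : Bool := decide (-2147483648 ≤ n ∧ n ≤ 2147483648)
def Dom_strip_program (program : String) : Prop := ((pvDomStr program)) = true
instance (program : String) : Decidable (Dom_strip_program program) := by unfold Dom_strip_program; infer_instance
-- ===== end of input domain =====

-- B changes only the decomposition (find/slice instead of a stateful flag loop); simpler, same O(n) cost.

-- ===== PORT A =====
-- allowed_commands = [">", "<", "+", "-", "[", "]", ",", ".", "!", "#"]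
def pvAllowedA : List Char := ['>', '<', '+', '-', '[', ']', ',', '.', '!', '#']

-- one iteration of A's for-loop body over the state (ret, input)
def pvStepA (st : List Char × Bool) (x : Char) : List Char × Bool :=
  if x = '!' then (st.1 ++ [x], true)
  else if st.2 then (st.1 ++ [x], st.2)
  else if x ∈ pvAllowedA then (st.1 ++ [x], st.2)
  else st

def strip_program (program : String) : String :=
  String.ofList (program.toList.foldl pvStepA ([], false)).1

-- ===== PORT B =====
-- allowed = {'>', '<', '+', '-', '[', ']', ',', '.', '!', '#'}
def pvAllowedB (c : Char) : Bool := c ∈ ['>', '<', '+', '-', '[', ']', ',', '.', '!', '#']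

def strip_program_alt (program : String) : String :=
  let idx := PySem.Str.find program "!"
  if idx = -1 then
    String.ofList (program.toList.filter pvAllowedB)
  else
    String.ofList ((PySem.Str.slice program none (some idx)).toList.filter pvAllowedB
               ++ (PySem.Str.slice program (some idx) none).toList)

-- ===== PRECONDITION & SPEC =====
def Spec_strip_program (program : String) (out : String) : Prop := out = strip_program_alt program
instance (program : String) (out : String) : Decidable (Spec_strip_program program out) := by unfold Spec_strip_program; infer_instance

-- ===== CLAIM (what is proved, stated in full; the proofs are below) =====
def Claim_equal_strip_program : Prop := ∀ (program : String), Dom_strip_program program → Spec_strip_program program (strip_program program)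

-- ===== LEMMAS AND PROOFS =====

-- recursive form of A's loop (flag-indexed)
def pvGoA : List Char → Bool → List Char
  | [], _ => []
  | x :: xs, b =>
    if x = '!' then x :: pvGoA xs true
    else if b then x :: pvGoA xs b
    else if x ∈ pvAllowedA then x :: pvGoA xs b
    else pvGoA xs b

theorem pvFoldA_eq_go : ∀ (cs : List Char) (acc : List Char) (b : Bool),
    (cs.foldl pvStepA (acc, b)).1 = acc ++ pvGoA cs b := by
  intro cs
  induction cs with
  | nil => intro acc b; simp [pvGoA]
  | cons x xs ih =>
    intro acc b
    simp only [List.foldl_cons, pvStepA, pvGoA]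
    by_cases hx : x = '!'
    · simp [hx, ih]
    · by_cases hb : b
      · simp [hx, hb, ih]
      · by_cases hm : x ∈ pvAllowedA
        · simp [hx, hb, hm, ih]
        · simp [hx, hb, hm, ih]

theorem pvGoA_true : ∀ (cs : List Char), pvGoA cs true = cs := by
  intro cs
  induction cs with
  | nil => rfl
  | cons x xs ih => by_cases hx : x = '!' <;> simp [pvGoA, hx, ih]

theorem pvAllowed_agree (x : Char) : (x ∈ pvAllowedA) ↔ pvAllowedB x = true := by
  simp [pvAllowedA, pvAllowedB]

theorem pvGoA_no_bang : ∀ (cs : List Char), '!' ∉ cs → pvGoA cs false = cs.filter pvAllowedB := by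
  intro cs
  induction cs with
  | nil => intro _; rfl
  | cons x xs ih =>
    intro h
    have hx : x ≠ '!' := fun hx => h (hx ▸ List.mem_cons_self)
    have hxs : '!' ∉ xs := fun hm => h (List.mem_cons_of_mem _ hm)
    by_cases hm : x ∈ pvAllowedA
    · have := (pvAllowed_agree x).mp hm
      simp [pvGoA, hx, hm, this, ih hxs]
    · have : pvAllowedB x = false := by
        cases hB : pvAllowedB x
        · rfl
        · exact absurd ((pvAllowed_agree x).mpr hB) hm
      simp [pvGoA, hx, hm, this, ih hxs]

theorem pvGoA_split : ∀ (k : ℕ) (cs : List Char),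
    (∀ i, i < k → cs[i]? ≠ some '!') → cs[k]? = some '!' →
    pvGoA cs false = (cs.take k).filter pvAllowedB ++ cs.drop k := by
  intro k
  induction k with
  | zero =>
    intro cs _ hk
    cases cs with
    | nil => simp at hk
    | cons x xs =>
      simp only [List.getElem?_cons_zero, Option.some.injEq] at hk
      subst hk
      simp [pvGoA, pvGoA_true]
  | succ k ih =>
    intro cs hlt hk
    cases cs with
    | nil => simp at hk
    | cons x xs =>
      have hx : x ≠ '!' := by
        have := hlt 0 (Nat.succ_pos _)
        simpa using this
      have hlt' : ∀ i, i < k → xs[i]? ≠ some '!' := by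
        intro i hi
        have := hlt (i + 1) (by omega)
        simpa using this
      have hk' : xs[k]? = some '!' := by simpa using hk
      by_cases hm : x ∈ pvAllowedA
      · have := (pvAllowed_agree x).mp hm
        simp [pvGoA, hx, hm, this, ih xs hlt' hk']
      · have : pvAllowedB x = false := by
          cases hB : pvAllowedB x
          · rfl
          · exact absurd ((pvAllowed_agree x).mpr hB) hm
        simp [pvGoA, hx, hm, this, ih xs hlt' hk']

theorem pvPrefix_singleton (a : Char) (l : List Char) :
    [a] <+: l ↔ l[0]? = some a := by
  constructor
  · rintro ⟨t, ht⟩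
    subst ht; rfl
  · intro h
    cases l with
    | nil => simp at h
    | cons x xs =>
      simp only [List.getElem?_cons_zero, Option.some.injEq] at h
      exact ⟨xs, by simp [h]⟩

-- ===== VERDICT (by name: the statement is the Claim_ definition above) =====
theorem strip_program_spec : Claim_equal_strip_program := by
  intro program _
  unfold Spec_strip_program strip_program strip_program_alt
  have hfold := pvFoldA_eq_go program.toList [] false
  have hbang : "!".toList = ['!'] := rfl
  by_cases hfind : PySem.Str.find program "!" = -1
  all_goals have hfindC : PySem.Str.find program "!" = PySem.Chars.find program.toList ['!'] := by rw [PySem.Str.find_eq, hbang]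
  · -- '!' does not occur
    have hnin : ¬ ("!".toList <:+: program.toList) :=
      (PySem.Str.find_eq_neg_one_iff _ _).mp hfind
    have hmem : '!' ∉ program.toList := by
      intro hm
      apply hnin
      obtain ⟨s, t, hst⟩ := List.append_of_mem hm
      exact ⟨s, t, by simp [hst]⟩
    rw [hfindC] at hfind
    simp [hfind, hfold, pvGoA_no_bang _ hmem]
  · -- '!' occurs at index (find).toNat
    have hpos : 0 ≤ PySem.Str.find program "!" := by
      have := PySem.Chars.neg_one_le_find program.toList ['!']
      rw [hfindC] at hfind ⊢
      omega
    set idx := PySem.Str.find program "!" with hidx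
    have heq : idx = PySem.Chars.find program.toList ['!'] := hidx.trans hfindC
    have hspec := PySem.Chars.find_spec (s := program.toList) (sub := ['!']) (heq ▸ hpos)
    rw [← heq] at hspec
    obtain ⟨hpre, hmin⟩ := hspec
    have hk : program.toList[idx.toNat]? = some '!' := by
      have := (pvPrefix_singleton '!' (program.toList.drop idx.toNat)).mp hpre
      simpa [List.getElem?_drop] using this
    have hklt : ∀ i, i < idx.toNat → program.toList[i]? ≠ some '!' := by
      intro i hi hcon
      exact hmin i hi ((pvPrefix_singleton '!' (program.toList.drop i)).mpr
        (by simpa [List.getElem?_drop] using hcon))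
    have hsplit := pvGoA_split idx.toNat program.toList hklt hk
    have hslice1 : (PySem.Str.slice program none (some idx)).toList = program.toList.take idx.toNat := by
      simp [PySem.Str.slice, PySem.List.slice_to _ hpos]
    have hslice2 : (PySem.Str.slice program (some idx) none).toList = program.toList.drop idx.toNat := by
      simp [PySem.Str.slice, PySem.List.slice_from _ hpos]
    simp [hfind, hfold, hsplit, hslice1, hslice2]
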